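-- pv_equiv track=rewrite | github.com/cmbenello/141-discussion | problems/expressions.py | cl53_shift_digits_wrap
-- ===== SOURCE A (Python) =====
-- def cl53_shift_digits_wrap(s: str, k: int) -> str:
--     """Midterm-style
--     Problem: Shift every decimal digit in s by k (an int in [-9,9]), wrapping within 0..9; other
--     characters unchanged.
--     Inputs: s (str), k (int)
--     Output: new str.
--     Example: ("a9b8", 2) -> "a1b0"; ("pass1", -2) -> "pass9".
--     """
--     result = ''
--     for ch in s:
--         if '0' <= ch <= '9':
--             digit = (ord(ch) - ord('0') + k) % 10
--             result += chr(digit + ord('0'))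
--         else:
--             result += ch
--     return result
-- ===== SOURCE B (Python) =====
-- def cl53_shift_digits_wrap(s: str, k: int) -> str:
--     # Rotate the digit alphabet once (shift-by-k is a rotation of "0123456789"),
--     # then rewrite the string by divide-and-conquer: split in half, recurse, concatenate.
--     rot = "0123456789"[k % 10:] + "0123456789"[:k % 10]
--     def go(t):
--         if len(t) == 0:
--             return ""
--         if len(t) == 1:
--             return rot[ord(t) - 48] if '0' <= t <= '9' else t
--         m = len(t) // 2
--         return go(t[:m]) + go(t[m:])
--     return go(s)
-- ===== Notes on version B (the rewrite author's own statement) =====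
-- stated objective: alternative
-- what changed: B precomputes the shifted digit alphabet as a rotation of "0123456789" and rewrites the string by divide-and-conquer (split in half, recurse, concatenate), replacing A's left-to-right accumulator loop with per-character modular arithmetic.
import Mathlib
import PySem

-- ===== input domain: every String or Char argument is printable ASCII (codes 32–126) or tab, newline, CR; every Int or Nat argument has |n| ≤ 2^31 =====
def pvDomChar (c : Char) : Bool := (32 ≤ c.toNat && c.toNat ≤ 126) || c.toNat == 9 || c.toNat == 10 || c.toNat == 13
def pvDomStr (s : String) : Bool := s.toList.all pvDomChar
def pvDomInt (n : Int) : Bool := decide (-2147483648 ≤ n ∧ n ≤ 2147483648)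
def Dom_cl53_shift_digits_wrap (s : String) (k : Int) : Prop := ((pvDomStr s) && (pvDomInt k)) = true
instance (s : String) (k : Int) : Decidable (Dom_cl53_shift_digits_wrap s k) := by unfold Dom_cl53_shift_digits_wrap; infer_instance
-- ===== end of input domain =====

-- B rewrites the string by divide-and-conquer over a precomputed rotated digit alphabet,
-- instead of A's left-to-right accumulator loop with per-character arithmetic; same return value.


-- ===== PORT A =====
-- literal transliteration: result = ''; for ch in s: if '0' <= ch <= '9' then append shifted digit else append ch
def cl53_shift_digits_wrap (s : String) (k : Int) : String :=
  String.ofList (s.toList.foldl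
    (fun result ch =>
      if '0' ≤ ch ∧ ch ≤ '9' then
        result ++ [Char.ofNat ((PySem.Int.mod ((ch.toNat : Int) - 48 + k) 10 + 48).toNat)]
      else
        result ++ [ch])
    [])

-- ===== PORT B =====
-- Source B's inner go: len 0 / len 1 base cases, otherwise split at len//2, recurse, concatenate.
-- rot[ord(t)-48] is an in-range index (rot has length 10, t a digit), ported as getD.
def pvGoB (rot : List Char) : List Char → List Char
  | [] => []
  | [c] => if '0' ≤ c ∧ c ≤ '9' then [rot.getD (c.toNat - 48) c] else [c]
  | a :: b :: rest =>
      let m := (a :: b :: rest).length / 2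
      pvGoB rot ((a :: b :: rest).take m) ++ pvGoB rot ((a :: b :: rest).drop m)
termination_by t => t.length
decreasing_by
  · simp; omega
  · simp; omega

-- rot = "0123456789"[k % 10:] + "0123456789"[:k % 10]  (Python % : PySem.Int.mod)
def cl53_shift_digits_wrap_alt (s : String) (k : Int) : String :=
  let rot := "0123456789".toList.drop (PySem.Int.mod k 10).toNat
             ++ "0123456789".toList.take (PySem.Int.mod k 10).toNat
  String.ofList (pvGoB rot s.toList)

-- ===== PRECONDITION & SPEC =====
def Spec_cl53_shift_digits_wrap (s : String) (k : Int) (out : String) : Prop := out = cl53_shift_digits_wrap_alt s k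
instance (s : String) (k : Int) (out : String) : Decidable (Spec_cl53_shift_digits_wrap s k out) := by unfold Spec_cl53_shift_digits_wrap; infer_instance

-- ===== CLAIM (what is proved, stated in full; the proofs are below) =====
def Claim_equal_cl53_shift_digits_wrap : Prop := ∀ (s : String) (k : Int), Dom_cl53_shift_digits_wrap s k → Spec_cl53_shift_digits_wrap s k (cl53_shift_digits_wrap s k)

-- ===== LEMMAS AND PROOFS =====

-- the per-character function both programs realise
def pvShift (k : Int) (c : Char) : Char :=
  if '0' ≤ c ∧ c ≤ '9' then
    Char.ofNat ((PySem.Int.mod ((c.toNat : Int) - 48 + k) 10 + 48).toNat)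
  else c

lemma foldlA_eq_map (k : Int) (l acc : List Char) :
    l.foldl
      (fun result ch =>
        if '0' ≤ ch ∧ ch ≤ '9' then
          result ++ [Char.ofNat ((PySem.Int.mod ((ch.toNat : Int) - 48 + k) 10 + 48).toNat)]
        else
          result ++ [ch]) acc = acc ++ l.map (pvShift k) := by
  induction l generalizing acc with
  | nil => simp
  | cons c l ih =>
      simp only [List.foldl_cons, List.map_cons, ih, pvShift]
      split_ifs <;> simp

lemma rot_getD (m j : Nat) (hm : m < 10) (hj : j < 10) (c : Char) :
    (("0123456789".toList.drop m ++ "0123456789".toList.take m).getD j c)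
      = Char.ofNat (48 + (j + m) % 10) := by
  interval_cases m <;> interval_cases j <;> rfl

lemma pvShift_eq_rot (k : Int) (c : Char) (h : '0' ≤ c ∧ c ≤ '9') :
    pvShift k c
      = ("0123456789".toList.drop (PySem.Int.mod k 10).toNat
          ++ "0123456789".toList.take (PySem.Int.mod k 10).toNat).getD (c.toNat - 48) c := by
  have hm : PySem.Int.mod k 10 = k % 10 := PySem.Int.mod_eq_emod_of_pos (by norm_num)
  have hm2 : PySem.Int.mod ((c.toNat : Int) - 48 + k) 10 = ((c.toNat : Int) - 48 + k) % 10 :=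
    PySem.Int.mod_eq_emod_of_pos (by norm_num)
  have hk0 : 0 ≤ k % 10 := Int.emod_nonneg k (by norm_num)
  have hk9 : k % 10 < 10 := Int.emod_lt_of_pos k (by norm_num)
  obtain ⟨h1, h2⟩ := h
  have hn1 : 48 ≤ c.toNat := by
    have h := UInt32.le_iff_toNat_le.mp (Char.le_def.mp h1)
    have e : ('0').val.toNat = 48 := by decide
    rw [e] at h; exact h
  have hn2 : c.toNat ≤ 57 := by
    have h := UInt32.le_iff_toNat_le.mp (Char.le_def.mp h2)
    have e : ('9').val.toNat = 57 := by decide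
    rw [e] at h; exact h
  rw [rot_getD _ _ (by omega) (by omega) c]
  unfold pvShift
  rw [if_pos ⟨h1, h2⟩, hm, hm2]
  congr 1
  omega

lemma goB_eq_map (k : Int) (t : List Char) :
    pvGoB ("0123456789".toList.drop (PySem.Int.mod k 10).toNat
            ++ "0123456789".toList.take (PySem.Int.mod k 10).toNat) t
      = t.map (pvShift k) := by
  fun_induction pvGoB with
  | case1 => rfl
  | case2 c h =>
      rw [List.map_cons, List.map_nil, pvShift_eq_rot k c h]
  | case3 c h => simp [pvShift, h]
  | case4 a b rest m ih1 ih2 =>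
      simp only at ih1 ih2 ⊢
      rw [ih1, ih2, ← List.map_append, List.take_append_drop]

theorem cl53_shift_digits_wrap_spec : Claim_equal_cl53_shift_digits_wrap := by
  intro s k _
  unfold Spec_cl53_shift_digits_wrap cl53_shift_digits_wrap cl53_shift_digits_wrap_alt
  simp only [foldlA_eq_map, goB_eq_map, List.nil_append]
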